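-- pv_equiv track=rewrite | github.com/palika-hub/OS-Algorithms | algorithms/cpu_scheduling.py | change_time_to_process
-- ===== SOURCE A (Python) =====
-- def change_time_to_process(process_at_t):
--     processes_time = []
--     start = 0
--     total = 1
--     for i in range(1,len(process_at_t)):
--         if process_at_t[i] == process_at_t[i-1] :
--             total+=1
--         else :
--             processes_time.append([process_at_t[i-1] , start , start+total])
--             start = i
--             total =1
--     processes_time.append([process_at_t[-1] , start , start+total])
--
--     return processes_time
-- ===== SOURCE B (Python) =====
-- def change_time_to_process(process_at_t):
--     n = len(process_at_t)
--     bounds = [0] + [i for i in range(1, n) if process_at_t[i] != process_at_t[i - 1]] + [n]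
--     return [[process_at_t[bounds[j]], bounds[j], bounds[j + 1]]
--             for j in range(len(bounds) - 1)]
-- ===== Notes on version B (the rewrite author's own statement) =====
-- stated objective: alternative
-- what changed: B first collects the boundary indices where the value changes and then builds each interval from consecutive boundary pairs, instead of accumulating a running start/count while scanning.
import Mathlib
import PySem

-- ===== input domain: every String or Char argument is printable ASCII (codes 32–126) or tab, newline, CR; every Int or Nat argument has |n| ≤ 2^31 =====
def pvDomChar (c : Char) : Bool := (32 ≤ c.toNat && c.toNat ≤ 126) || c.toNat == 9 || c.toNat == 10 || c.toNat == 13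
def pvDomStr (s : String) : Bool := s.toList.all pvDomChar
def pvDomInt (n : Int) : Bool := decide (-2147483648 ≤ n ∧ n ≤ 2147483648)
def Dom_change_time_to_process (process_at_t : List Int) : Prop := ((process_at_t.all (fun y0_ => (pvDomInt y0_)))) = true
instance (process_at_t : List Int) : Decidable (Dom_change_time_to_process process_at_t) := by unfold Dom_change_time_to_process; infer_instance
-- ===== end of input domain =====

-- B collects the change-point boundary indices first and then emits one interval per
-- consecutive boundary pair, instead of A's running start/count accumulator (objective: alternative).

-- ===== PORT A =====
def change_time_to_process (process_at_t : List Int) : List (List Int) :=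
  let s := (PySem.List.pyRange 1 (process_at_t.length : Int) 1).foldl
    (fun (st : List (List Int) × Int × Int) i =>
      if PySem.List.pyGetD process_at_t i 0 = PySem.List.pyGetD process_at_t (i - 1) 0 then
        (st.1, st.2.1, st.2.2 + 1)
      else
        (st.1 ++ [[PySem.List.pyGetD process_at_t (i - 1) 0, st.2.1, st.2.1 + st.2.2]], i, 1))
    ([], 0, 1)
  s.1 ++ [[PySem.List.pyGetD process_at_t (-1) 0, s.2.1, s.2.1 + s.2.2]]

-- ===== PORT B =====
def change_time_to_process_alt (process_at_t : List Int) : List (List Int) :=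
  let n : Int := (process_at_t.length : Int)
  let bounds : List Int :=
    [0] ++ (PySem.List.pyRange 1 n 1).filter
      (fun i => PySem.List.pyGetD process_at_t i 0 ≠ PySem.List.pyGetD process_at_t (i - 1) 0)
    ++ [n]
  (PySem.List.pyRange 0 ((bounds.length : Int) - 1) 1).map (fun j =>
    [PySem.List.pyGetD process_at_t (PySem.List.pyGetD bounds j 0) 0,
     PySem.List.pyGetD bounds j 0,
     PySem.List.pyGetD bounds (j + 1) 0])

-- ===== PRECONDITION & SPEC =====
-- Pre_: the Python A raises IndexError (process_at_t[-1]) on the empty list; nothing else is excluded.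
def Pre_change_time_to_process (process_at_t : List Int) : Prop := process_at_t ≠ []
instance (process_at_t : List Int) : Decidable (Pre_change_time_to_process process_at_t) := by unfold Pre_change_time_to_process; infer_instance
def pvWitness_change_time_to_process : List Int := [1, 1, 2]

def Spec_change_time_to_process (process_at_t : List Int) (out : List (List Int)) : Prop := out = change_time_to_process_alt process_at_t
instance (process_at_t : List Int) (out : List (List Int)) : Decidable (Spec_change_time_to_process process_at_t out) := by unfold Spec_change_time_to_process; infer_instance

-- ===== CLAIM (what is proved, stated in full; the proofs are below) =====
def Claim_equal_change_time_to_process : Prop := ∀ (process_at_t : List Int), Dom_change_time_to_process process_at_t → Pre_change_time_to_process process_at_t → Spec_change_time_to_process process_at_t (change_time_to_process process_at_t)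

-- ===== LEMMAS AND PROOFS =====

-- abbreviations used only by the proofs
def pvG (xs : List Int) (p q : Int) : List Int := [PySem.List.pyGetD xs p 0, p, q]

def pvChanges (xs : List Int) (k : Int) : List Int :=
  (PySem.List.pyRange 1 k 1).filter
    (fun i => PySem.List.pyGetD xs i 0 ≠ PySem.List.pyGetD xs (i - 1) 0)

theorem pv_getLastD_cons {α : Type} (b a : α) (t : List α) : (b :: t).getLastD a = t.getLastD b := by
  cases t <;> simp [List.getLastD]
theorem pv_getLastD_concat {α : Type} (l : List α) (a d : α) : (l ++ [a]).getLastD d = a := by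
  induction l generalizing d with
  | nil => rfl
  | cons x t ih => rw [List.cons_append, pv_getLastD_cons]; exact ih x
theorem pv_zip_snoc (xs : List Int) (a v : Int) (cs : List Int) :
    List.zipWith (pvG xs) (a :: (cs ++ [v])) (cs ++ [v]) =
      List.zipWith (pvG xs) (a :: cs) cs ++ [pvG xs (cs.getLastD a) v] := by
  induction cs generalizing a with
  | nil => rfl
  | cons b t ih => rw [pv_getLastD_cons]; simpa using ih b

theorem pv_invariant (xs : List Int) (m : Nat) (h1 : 1 ≤ m) (hm : m ≤ xs.length) :
    ((PySem.List.pyRange 1 (m : Int) 1).foldl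
      (fun (st : List (List Int) × Int × Int) i =>
        if PySem.List.pyGetD xs i 0 = PySem.List.pyGetD xs (i - 1) 0 then
          (st.1, st.2.1, st.2.2 + 1)
        else
          (st.1 ++ [[PySem.List.pyGetD xs (i - 1) 0, st.2.1, st.2.1 + st.2.2]], i, 1))
      ([], 0, 1)) =
      (List.zipWith (pvG xs) (0 :: pvChanges xs m) (pvChanges xs m),
        (pvChanges xs m).getLastD 0, (m : Int) - (pvChanges xs m).getLastD 0) ∧
    PySem.List.pyGetD xs ((m : Int) - 1) 0 = PySem.List.pyGetD xs ((pvChanges xs m).getLastD 0) 0 ∧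
    0 ≤ (pvChanges xs m).getLastD 0 ∧ (pvChanges xs m).getLastD 0 < (m : Int) := by
  induction m with
  | zero => omega
  | succ m ih =>
    rcases Nat.lt_or_ge m 1 with hm0 | hm1
    · interval_cases m
      simp [pvChanges, PySem.List.pyRange_one_eq_nil]
    · obtain ⟨hfold, hQ, hge, hlt⟩ := ih hm1 (by omega)
      have hcast : ((m + 1 : Nat) : Int) = (m : Int) + 1 := by push_cast; ring
      have hrange : PySem.List.pyRange 1 ((m : Int) + 1) 1
          = PySem.List.pyRange 1 (m : Int) 1 ++ [(m : Int)] :=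
        PySem.List.pyRange_one_succ_right (by omega)
      have hchanges : pvChanges xs ((m : Int) + 1)
          = pvChanges xs (m : Int) ++ (if PySem.List.pyGetD xs (m : Int) 0 ≠ PySem.List.pyGetD xs ((m : Int) - 1) 0 then [(m : Int)] else []) := by
        simp only [pvChanges, hrange, List.filter_append]
        congr 1
        rw [List.filter_singleton]
        by_cases h2 : PySem.List.pyGetD xs (m : Int) 0 ≠ PySem.List.pyGetD xs ((m : Int) - 1) 0
        · rw [Bool.cond_decide, if_pos h2]
        · rw [Bool.cond_decide, if_neg h2]
      rw [hcast, hrange, List.foldl_append, hfold, hchanges]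
      by_cases h : PySem.List.pyGetD xs (m : Int) 0 = PySem.List.pyGetD xs ((m : Int) - 1) 0
      · rw [if_neg (not_not_intro h), List.append_nil]
        simp only [List.foldl_cons, List.foldl_nil]
        rw [if_pos h]
        refine ⟨?_, ?_, hge, by omega⟩
        · have h3 : (m : Int) + 1 - (pvChanges xs (m : Int)).getLastD 0
              = ((m : Int) - (pvChanges xs (m : Int)).getLastD 0) + 1 := by omega
          rw [h3]
        · have e : (m : Int) + 1 - 1 = (m : Int) := by omega
          rw [e, h]; exact hQ
      · rw [if_pos h]
        simp only [List.foldl_cons, List.foldl_nil]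
        rw [if_neg h]
        rw [pv_zip_snoc, pv_getLastD_concat]
        refine ⟨?_, ?_, by omega, by omega⟩
        · have e1 : (pvChanges xs (m : Int)).getLastD 0 + ((m : Int) - (pvChanges xs (m : Int)).getLastD 0) = (m : Int) := by omega
          have e2 : (m : Int) + 1 - (m : Int) = 1 := by omega
          rw [e1, e2, hQ]
          simp [pvG]
        · have e : (m : Int) + 1 - 1 = (m : Int) := by omega
          rw [e]

theorem pv_aux_pairs (xs : List Int) : ∀ (cs : List Int),
    (List.range (cs.length - 1)).map (fun k =>
      [PySem.List.pyGetD xs (cs.getD k 0) 0, cs.getD k 0, cs.getD (k + 1) 0]) =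
    List.zipWith (pvG xs) cs cs.tail := by
  intro cs
  induction cs with
  | nil => rfl
  | cons a t ih =>
    cases t with
    | nil => rfl
    | cons b u =>
      simp only [List.length_cons, Nat.add_sub_cancel] at ih ⊢
      rw [List.range_succ_eq_map, List.map_cons, List.map_map]
      simp only [List.tail_cons] at ih ⊢
      simp only [List.zipWith_cons_cons]
      refine congrArg₂ List.cons rfl ?_
      rw [← ih]
      apply List.map_congr_left
      intro k hk
      simp [Function.comp]

theorem pv_pairs_map (xs : List Int) (bs : List Int) :
    (PySem.List.pyRange 0 ((bs.length : Int) - 1) 1).map (fun j =>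
      [PySem.List.pyGetD xs (PySem.List.pyGetD bs j 0) 0,
       PySem.List.pyGetD bs j 0,
       PySem.List.pyGetD bs (j + 1) 0]) =
    List.zipWith (pvG xs) bs bs.tail := by
  rw [PySem.List.pyRange_one]
  have hts : ((bs.length : Int) - 1 - 0).toNat = bs.length - 1 := by omega
  rw [hts, List.map_map]
  refine Eq.trans (List.map_congr_left ?_) (pv_aux_pairs xs bs)
  intro k hk
  have h0 : (0 : Int) + (k : Int) = ((k : Nat) : Int) := by omega
  have h2 : ((k : Int) + 1) = (((k + 1 : Nat)) : Int) := by push_cast; ring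
  simp only [Function.comp, h0]
  rw [PySem.List.pyGetD_natCast, h2, PySem.List.pyGetD_natCast]

-- ===== VERDICT (by name: the statement is the Claim_ definition above) =====
theorem change_time_to_process_spec : Claim_equal_change_time_to_process := by
  unfold Claim_equal_change_time_to_process
  intro xs _ hpre
  unfold Spec_change_time_to_process change_time_to_process change_time_to_process_alt
  have h0 : 0 < xs.length := by
    cases xs with
    | nil => exact absurd rfl hpre
    | cons a t => simp
  obtain ⟨hfold, hQ, hge, hlt⟩ := pv_invariant xs xs.length (by omega) (le_refl _)
  simp only [pvChanges] at hfold hQ hge hlt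
  dsimp only
  rw [hfold, pv_pairs_map]
  dsimp only
  simp only [List.cons_append, List.tail_cons]
  rw [pv_zip_snoc]
  congr 1
  have hneg : PySem.List.pyGetD xs (-1) 0 = PySem.List.pyGetD xs ((xs.length : Int) - 1) 0 := by
    rw [PySem.List.pyGetD_neg_ofNat xs 1 0 (by omega) (by omega)]
    have e : ((xs.length : Int) - 1) = ((xs.length - 1 : Nat) : Int) := by omega
    rw [e, PySem.List.pyGetD_natCast]
    rw [List.getD_eq_getElem?_getD, List.getElem?_eq_getElem (by omega)]
    rfl
  rw [hneg, hQ]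
  rw [show ∀ s n : Int, s + (n - s) = n from fun s n => by omega]
  rfl
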